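-- pv_equiv track=rewrite | github.com/karlwnw/adventofcode2019 | python/day16.py | part2
-- ===== SOURCE A (Python) =====
-- from itertools import cycle, accumulate
--
-- def part2(numbers, iterations=100):
--     """The trick is to notice the following:
--
--     - the triangular matrix pattern (all zeroes at the bottom
--       left corner)
--
--       - which implies that the 2nd half of the output only depends
--         on the 2nd half of the input, because we always multiply
--         the first digits by 0.
--
--         - the 2nd phase being "1", which makes each digit of the 2nd
--           half, starting from the end equal to the accumulated sum of
--           the reversed original values mod 10.
--           We now have a way to quickly compute the 2nd half from the
--           end.
--
--           12345678
--
--           8 = 8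
--           5 = 8 + 7 = 15 % 10
--           1 = 8 + 7 + 6 = 21 % 10
--           6 = 8 + 7 + 6 + 5 = 26 % 10
--
--           2nd half = 6158
--
--     - and with input size of 650, if we duplicate it 10000 times,
--       (6,500,000) and with a 7-digit offset (5,978,261), the result
--       we are looking for is close to the end of the number, hence
--       in the 2nd half.
--
--     12345678
--     1*1  + 2*0  + 3*-1 + 4*0  + 5*1  + 6*0  + 7*-1 + 8*0  = 4
--     1*0  + 2*1  + 3*1  + 4*0  + 5*0  + 6*-1 + 7*-1 + 8*0  = 8
--     1*0  + 2*0  + 3*1  + 4*1  + 5*1  + 6*0  + 7*0  + 8*0  = 2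
--     1*0  + 2*0  + 3*0  + 4*1  + 5*1  + 6*1  + 7*1  + 8*0  = 2
--     1*0  + 2*0  + 3*0  + 4*0  + 5*1  + 6*1  + 7*1  + 8*1  = 6
--     1*0  + 2*0  + 3*0  + 4*0  + 5*0  + 6*1  + 7*1  + 8*1  = 1
--     1*0  + 2*0  + 3*0  + 4*0  + 5*0  + 6*0  + 7*1  + 8*1  = 5
--     1*0  + 2*0  + 3*0  + 4*0  + 5*0  + 6*0  + 7*0  + 8*1  = 8
--     """
--     offset = int("".join(map(str, numbers[:7])))
--     size = len(numbers) * 10000 - offset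
--     generator = cycle(reversed(numbers))
--     data = [next(generator) for _ in range(size)]
--     for _ in range(iterations):
--         data = [s % 10 for s in accumulate(data)]
--     return "".join(str(i) for i in reversed(data[-8:]))
-- ===== SOURCE B (Python) =====
-- from math import comb
--
-- def _binom_mod(n, k, p):
--     # C(n, k) mod prime p, by Lucas's theorem (early exit once the product is 0)
--     r = 1
--     while k > 0 and r > 0:
--         r = r * comb(n % p, k % p) % p
--         n //= p
--         k //= p
--     return r
--
-- def part2(numbers, iterations=100):
--     # After t >= 1 phases of cumulative-sum-mod-10, output[j] = sum_d C(t-1+d, d) * data[j-d] (mod 10);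
--     # compute the binomial weights mod 10 once (Lucas mod 2 and mod 5, CRT) and only the <= 8 needed digits.
--     offset = int("".join(map(str, numbers[:7])))
--     n = len(numbers)
--     size = n * 10000 - offset
--     rev = numbers[::-1]
--     lo = max(size - 8, 0)
--     if iterations <= 0:
--         digits = [rev[j % n] for j in range(lo, size)]
--     else:
--         t1 = iterations - 1
--         w = [(5 * _binom_mod(t1 + d, d, 2) + 6 * _binom_mod(t1 + d, d, 5)) % 10
--              for d in range(size)]
--         digits = []
--         for j in range(lo, size):
--             s = 0
--             d = 0
--             for wd in w[: j + 1]: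
--                 s += wd * rev[(j - d) % n]
--                 d += 1
--             digits.append(s % 10)
--     return "".join(str(v) for v in reversed(digits))
-- ===== Notes on version B (the rewrite author's own statement) =====
-- stated objective: faster
-- what changed: Instead of simulating all `iterations` cumulative-sum-mod-10 phases over the whole suffix, B computes only the 8 requested digits directly as convolutions with binomial-coefficient weights C(iterations-1+d, d) mod 10, obtained via Lucas's theorem mod 2 and mod 5 plus CRT.
import Mathlib
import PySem

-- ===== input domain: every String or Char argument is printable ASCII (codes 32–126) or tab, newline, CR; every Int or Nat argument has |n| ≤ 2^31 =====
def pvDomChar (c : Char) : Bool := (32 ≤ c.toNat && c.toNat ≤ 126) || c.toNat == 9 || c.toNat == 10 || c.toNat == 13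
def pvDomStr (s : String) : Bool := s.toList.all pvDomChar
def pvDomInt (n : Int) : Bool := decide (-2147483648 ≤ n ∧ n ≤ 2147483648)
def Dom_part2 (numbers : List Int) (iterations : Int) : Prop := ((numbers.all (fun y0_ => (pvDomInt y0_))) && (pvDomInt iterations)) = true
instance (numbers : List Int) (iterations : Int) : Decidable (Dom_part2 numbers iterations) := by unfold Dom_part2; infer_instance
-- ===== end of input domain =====

-- B computes the ≤ 8 requested digits directly as binomial-weight convolutions (Lucas mod 2/5 + CRT)
-- instead of simulating all `iterations` cumulative-sum phases; objective: faster.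

-- ===== PORT A =====

-- offset = int("".join(map(str, numbers[:7]))) — this identical line occurs verbatim in both Pythons
def offsetOf? (numbers : List Int) : Option Int :=
  PySem.Int.ofStr? (PySem.Str.join "" ((PySem.List.slice numbers none (some 7)).map (fun v => PySem.Int.toStr v)))

-- itertools.accumulate(data): running sums, as a left fold carrying (list so far, running total) — exact
def pyAccumulate (xs : List Int) : List Int :=
  ((xs.foldl (fun st x => (st.1 + x, (st.1 + x) :: st.2)) ((0 : Int), ([] : List Int))).2).reverse

def part2 (numbers : List Int) (iterations : Int) : String :=
  match offsetOf? numbers with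
  | none => ""      -- int() raises ValueError here; excluded by Pre_part2
  | some offset =>
    let size : Int := (numbers.length : Int) * 10000 - offset
    -- data = [next(g) for _ in range(size)] with g = cycle(reversed(numbers)):
    -- element i is reversed(numbers)[i mod len] — exact (numbers ≠ [] whenever int() parsed)
    let rev : List Int := numbers.reverse
    let data : List Int := (List.range size.toNat).map (fun i => rev.getD (i % numbers.length) 0)
    -- for _ in range(iterations): data = [s % 10 for s in accumulate(data)]
    let final := (fun d => (pyAccumulate d).map (fun s => PySem.Int.mod s 10))^[iterations.toNat] data
    -- "".join(str(i) for i in reversed(data[-8:]))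
    PySem.Str.join "" (((PySem.List.slice final (some (-8)) none).reverse).map (fun i => PySem.Int.toStr i))

-- ===== PORT B =====

-- Source B's _binom_mod: C(n, k) mod prime p by Lucas's theorem; math.comb → Nat.choose;
-- the '1 < p' test only makes the loop total (p is the literal 2 or 5 at every call site)
def binomMod (n k p r : Nat) : Nat :=
  if h : 0 < k ∧ 0 < r ∧ 1 < p then
    binomMod (n / p) (k / p) p (r * Nat.choose (n % p) (k % p) % p)
  else r
termination_by k
decreasing_by exact Nat.div_lt_self h.1 h.2.2

def part2_alt (numbers : List Int) (iterations : Int) : String :=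
  match offsetOf? numbers with
  | none => ""      -- int() raises ValueError here; excluded by Pre_part2
  | some offset =>
    let n := numbers.length
    let size : Int := (n : Int) * 10000 - offset
    let rev : List Int := numbers.reverse   -- numbers[::-1] (PySem.List.slice?_none_none_neg_one)
    let lo : Int := max (size - 8) 0
    let digits : List Int :=
      if iterations ≤ 0 then
        (PySem.List.pyRange lo size 1).map (fun j => rev.getD (j.toNat % n) 0)
      else
        let t1 : Nat := (iterations - 1).toNat   -- iterations ≥ 1 here, so exact
        let w : List Int := (List.range size.toNat).map (fun d =>
          PySem.Int.mod (5 * (binomMod (t1 + d) d 2 1 : Int) + 6 * (binomMod (t1 + d) d 5 1 : Int)) 10)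
        (PySem.List.pyRange lo size 1).map (fun j =>
          PySem.Int.mod (((PySem.List.slice w none (some (j + 1))).foldl
            (fun st wd => (st.1 + wd * rev.getD ((j.toNat - st.2.toNat) % n) 0, st.2 + 1))
            ((0 : Int), (0 : Int))).1) 10)
    PySem.Str.join "" ((digits.reverse).map (fun v => PySem.Int.toStr v))

-- ===== PRECONDITION & SPEC =====
-- Pre_ excludes exactly the inputs where A raises ValueError: int("".join(map(str, numbers[:7])))
-- fails iff numbers is empty or some of the 2nd..7th used numbers is negative (its '-' lands mid-string).
def Pre_part2 (numbers : List Int) (iterations : Int) : Prop :=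
  numbers ≠ [] ∧ ∀ x ∈ (numbers.take 7).drop 1, 0 ≤ x
instance (numbers : List Int) (iterations : Int) : Decidable (Pre_part2 numbers iterations) := by
  unfold Pre_part2; infer_instance

def pvWitness_part2 : List Int × Int := ([1, 2, 3], 2)

def Spec_part2 (numbers : List Int) (iterations : Int) (out : String) : Prop := out = part2_alt numbers iterations
instance (numbers : List Int) (iterations : Int) (out : String) : Decidable (Spec_part2 numbers iterations out) := by unfold Spec_part2; infer_instance

-- ===== CLAIM (what is proved, stated in full; the proofs are below) =====
def Claim_equal_part2 : Prop := ∀ (numbers : List Int) (iterations : Int), Dom_part2 numbers iterations → Pre_part2 numbers iterations → Spec_part2 numbers iterations (part2 numbers iterations)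

-- ===== LEMMAS AND PROOFS =====

-- the phase A iterates
def phaseA (d : List Int) : List Int := (pyAccumulate d).map (fun s => PySem.Int.mod s 10)

-- running sums starting from s
def accFrom (s : Int) : List Int → List Int
  | [] => []
  | x :: xs => (s + x) :: accFrom (s + x) xs

lemma foldl_acc (L : List Int) : ∀ (s : Int) (acc : List Int),
    L.foldl (fun st x => (st.1 + x, (st.1 + x) :: st.2)) (s, acc)
      = (s + L.sum, (accFrom s L).reverse ++ acc) := by
  induction L with
  | nil => simp [accFrom]
  | cons x xs ih => intro s acc; simp [List.foldl_cons, accFrom, ih]; ring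

lemma pyAccumulate_eq (L : List Int) : pyAccumulate L = accFrom 0 L := by
  simp [pyAccumulate, foldl_acc]

lemma accFrom_length (s : Int) (L : List Int) : (accFrom s L).length = L.length := by
  induction L generalizing s with
  | nil => rfl
  | cons x xs ih => simp [accFrom, ih]

lemma accFrom_getD (L : List Int) : ∀ (s : Int) (j : Nat), j < L.length →
    (accFrom s L).getD j 0 = s + (L.take (j + 1)).sum := by
  induction L with
  | nil => simp
  | cons x xs ih =>
    intro s j hj
    cases j with
    | zero => simp [accFrom]
    | succ j =>
      simp only [accFrom, List.getD_cons_succ, List.take_succ_cons, List.sum_cons]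
      rw [ih (s + x) j (by simpa using hj)]
      ring

lemma take_sum_eq (L : List Int) : ∀ (j : Nat), (L.take j).sum = ∑ k ∈ Finset.range j, L.getD k 0 := by
  induction L with
  | nil => intro j; simp
  | cons x xs ih =>
    intro j
    cases j with
    | zero => simp
    | succ j =>
      rw [Finset.sum_range_succ']
      simp [ih j]
      ring

lemma phaseA_length (L : List Int) : (phaseA L).length = L.length := by
  simp [phaseA, pyAccumulate_eq, accFrom_length]

lemma phaseA_getD (L : List Int) (j : Nat) (hj : j < L.length) :
    (phaseA L).getD j 0 = (∑ k ∈ Finset.range (j + 1), L.getD k 0) % 10 := by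
  have hl : j < (accFrom 0 L).length := by rw [accFrom_length]; exact hj
  rw [phaseA, pyAccumulate_eq]
  rw [List.getD_eq_getElem _ _ (by simpa using hl)]
  rw [List.getElem_map]
  rw [← List.getD_eq_getElem (accFrom 0 L) 0 hl]
  rw [accFrom_getD L 0 j hj, take_sum_eq]
  rw [PySem.Int.mod_eq_emod_of_pos (by norm_num)]
  simp

lemma phaseA_iterate_length (t : Nat) (L : List Int) : (phaseA^[t] L).length = L.length := by
  induction t generalizing L with
  | zero => rfl
  | succ t ih => rw [Function.iterate_succ_apply, ih, phaseA_length]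

lemma conv_step (a : Nat) (x : Nat → Int) (j : Nat) :
    ∑ k ∈ Finset.range (j + 1), ∑ d ∈ Finset.range (k + 1), (((a + d).choose d : Nat) : Int) * x (k - d)
      = ∑ d ∈ Finset.range (j + 1), (((a + 1 + d).choose d : Nat) : Int) * x (j - d) := by
  induction j with
  | zero => simp
  | succ j ih =>
    rw [Finset.sum_range_succ, ih]
    rw [Finset.sum_range_succ' (fun d => (((a + 1 + d).choose d : Nat) : Int) * x (j + 1 - d)) (j + 1)]
    rw [Finset.sum_range_succ' (fun d => (((a + d).choose d : Nat) : Int) * x (j + 1 - d)) (j + 1)]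
    have key : ∀ k ∈ Finset.range (j+1), (((a+1+(k+1)).choose (k+1) : Nat) : Int) * x (j+1-(k+1))
        = (((a+1+k).choose k : Nat):Int) * x (j-k) + (((a+(k+1)).choose (k+1) : Nat):Int) * x (j+1-(k+1)) := by
      intro k _
      have h1 : a + (k+1) = a + 1 + k := by omega
      have hc : (a + 1 + (k + 1)).choose (k + 1) = (a + 1 + k).choose k + (a + 1 + k).choose (k + 1) := by
        simpa using Nat.choose_succ_succ (a + 1 + k) k
      have h2 : j + 1 - (k + 1) = j - k := by omega
      rw [hc, h2, h1]
      push_cast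
      ring
    rw [Finset.sum_congr rfl key, Finset.sum_add_distrib]
    simp [Nat.choose_zero_right]
    ring

lemma phase_pow_getD (x : Nat → Int) (m : Nat) (a : Nat) :
    ∀ j, j < m →
      (phaseA^[a + 1] ((List.range m).map x)).getD j 0
        = (∑ d ∈ Finset.range (j + 1), (((a + d).choose d : Nat) : Int) * x (j - d)) % 10 := by
  induction a with
  | zero =>
    intro j hj
    rw [Function.iterate_one]
    rw [phaseA_getD _ j (by simpa using hj)]
    congr 1
    rw [← Finset.sum_range_reflect]
    apply Finset.sum_congr rfl
    intro k hk
    simp only [Finset.mem_range] at hk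
    rw [List.getD_eq_getElem _ _ (by simpa using (by omega : j + 1 - 1 - k < m))]
    simp [Nat.choose_self]
  | succ a ih =>
    intro j hj
    rw [Function.iterate_succ_apply']
    rw [phaseA_getD _ j (by rw [phaseA_iterate_length]; simpa using hj)]
    have hsum : ∑ k ∈ Finset.range (j + 1), (phaseA^[a + 1] ((List.range m).map x)).getD k 0
        = ∑ k ∈ Finset.range (j + 1), ((∑ d ∈ Finset.range (k + 1), (((a + d).choose d : Nat) : Int) * x (k - d)) % 10) := by
      apply Finset.sum_congr rfl
      intro k hk
      simp only [Finset.mem_range] at hk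
      exact ih k (by omega)
    rw [hsum, ← Finset.sum_int_mod, conv_step]

lemma binomMod_spec (p : Nat) (hp : p.Prime) : ∀ (k n r : Nat), r < p →
    binomMod n k p r = r * Nat.choose n k % p := by
  haveI : Fact p.Prime := ⟨hp⟩
  intro k
  induction k using Nat.strong_induction_on with
  | _ k ih =>
    intro n r hr
    rw [binomMod]
    by_cases hk : 0 < k
    · by_cases hr0 : 0 < r
      · rw [dif_pos ⟨hk, hr0, hp.one_lt⟩]
        rw [ih (k / p) (Nat.div_lt_self hk hp.one_lt) (n / p) _ (Nat.mod_lt _ hp.pos)]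
        have lucas := Choose.choose_modEq_choose_mod_mul_choose_div_nat (n := n) (k := k) (p := p)
        unfold Nat.ModEq at lucas
        calc r * Nat.choose (n % p) (k % p) % p * Nat.choose (n / p) (k / p) % p
            = r * (Nat.choose (n % p) (k % p) * Nat.choose (n / p) (k / p)) % p := by
              rw [Nat.mod_mul_mod, mul_assoc]
          _ = r * Nat.choose n k % p := by
              rw [Nat.mul_mod r, ← lucas, ← Nat.mul_mod]
      · have : r = 0 := by omega
        subst this
        simp
    · have : k = 0 := by omega
      subst this
      simp [Nat.mod_eq_of_lt hr]

lemma crt_two_five (c : Nat) : (5 * (c % 2) + 6 * (c % 5)) % 10 = c % 10 := by omega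

lemma drop_range_map (c k : Nat) : (List.range c).drop k = (List.range (c - k)).map (fun i => k + i) := by
  rw [List.range_eq_range', List.drop_range']
  simp [List.range'_eq_map_range]

lemma weight_term (C : Nat) (X : Int) :
    ((5 * ((C % 2 : Nat) : Int) + 6 * ((C % 5 : Nat) : Int)) % 10 * X) % 10 = ((C : Nat) : Int) * X % 10 := by
  have h1 : (5 * ((C % 2 : Nat) : Int) + 6 * ((C % 5 : Nat) : Int)) = (((5 * (C % 2) + 6 * (C % 5) : Nat)) : Int) := by
    push_cast; ring
  have h2 : ((5 * (C % 2) + 6 * (C % 5) : Nat) : Int) % 10 = (((5 * (C % 2) + 6 * (C % 5)) % 10 : Nat) : Int) := by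
    push_cast; ring
  rw [h1, h2, crt_two_five]
  have h3 : ((C % 10 : Nat) : Int) = (C : Int) % 10 := by push_cast; ring
  rw [h3, Int.mul_emod, Int.emod_emod_of_dvd _ dvd_rfl, ← Int.mul_emod]

lemma foldl_dot (rv : List Int) (nn jn : Nat) (ws : List Int) : ∀ (s0 : Int) (d0 : Nat),
    (ws.foldl (fun st wd => (st.1 + wd * rv.getD ((jn - st.2.toNat) % nn) 0, st.2 + 1))
      (s0, (d0 : Int))).1
      = s0 + ∑ i ∈ Finset.range ws.length, ws.getD i 0 * rv.getD ((jn - (d0 + i)) % nn) 0 := by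
  induction ws with
  | nil => intro s0 d0; simp
  | cons wv ws ih =>
    intro s0 d0
    have hcast : ((d0 : Int) + 1) = ((d0 + 1 : Nat) : Int) := by push_cast; ring
    simp only [List.foldl_cons, Int.toNat_natCast, hcast]
    rw [ih]
    simp only [List.length_cons]
    rw [Finset.sum_range_succ' (fun i => (wv :: ws).getD i 0 * rv.getD ((jn - (d0 + i)) % nn) 0) ws.length]
    simp only [List.getD_cons_succ, List.getD_cons_zero]
    have hidx : ∀ i : Nat, d0 + 1 + i = d0 + (i + 1) := fun i => by omega
    simp only [hidx]
    ring_nf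

lemma foldl_dot0 (rv : List Int) (nn jn : Nat) (ws : List Int) :
    (ws.foldl (fun st wd => (st.1 + wd * rv.getD ((jn - st.2.toNat) % nn) 0, st.2 + 1))
      ((0 : Int), (0 : Int))).1
      = ∑ i ∈ Finset.range ws.length, ws.getD i 0 * rv.getD ((jn - i) % nn) 0 := by
  have h := foldl_dot rv nn jn ws 0 0
  simpa using h

-- ===== VERDICT (by name: the statement is the Claim_ definition above) =====
set_option maxHeartbeats 1000000 in
theorem part2_spec : Claim_equal_part2 := by
  intro numbers iterations _hdom hpre
  unfold Spec_part2 part2 part2_alt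
  cases hoff : offsetOf? numbers with
  | none => rfl
  | some offset =>
  dsimp only
  have hn : 0 < numbers.length := List.length_pos_iff.mpr hpre.1
  set n := numbers.length with hn_def
  set size : Int := (n : Int) * 10000 - offset with hsize_def
  set m := size.toNat with hm_def
  set rev := numbers.reverse with hrev_def
  set lo : Int := max (size - 8) 0 with hlo_def
  have hlo1 : lo = ((m - 8 : Nat) : Int) := by
    rcases max_cases (size - 8) 0 with ⟨he, hle⟩ | ⟨he, hlt⟩ <;> rw [hlo_def, he] <;> omega
  have hlo2 : (size - lo).toNat = m - (m - 8) := by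
    rcases max_cases (size - 8) 0 with ⟨he, hle⟩ | ⟨he, hlt⟩ <;> rw [hlo_def, he] <;> omega
  have hph : (fun d : List Int => (pyAccumulate d).map (fun s => PySem.Int.mod s 10)) = phaseA := rfl
  rw [hph]
  have hfinlen : ∀ t : Nat, (phaseA^[t] ((List.range m).map (fun i : Nat => rev.getD (i % n) 0))).length = m := by
    intro t; rw [phaseA_iterate_length]; simp
  congr 1
  congr 1
  congr 1
  rw [PySem.List.slice_from_neg_ofNat _ 8 (by norm_num), hfinlen]
  by_cases hit : iterations ≤ 0
  · rw [if_pos hit]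
    have h0 : iterations.toNat = 0 := by omega
    rw [h0, Function.iterate_zero_apply]
    rw [← List.map_drop, drop_range_map, PySem.List.pyRange_one, List.map_map, List.map_map, hlo2]
    apply List.map_congr_left
    intro k hk
    have hk' : k < m - (m - 8) := List.mem_range.mp hk
    dsimp only [Function.comp]
    have hlk : ((lo + (k : Int)).toNat) = (m - 8) + k := by omega
    rw [hlk]
  · rw [if_neg hit]
    set t1 := (iterations - 1).toNat with ht1_def
    have hitn : iterations.toNat = t1 + 1 := by omega
    rw [hitn]
    apply List.ext_getElem
    · rw [List.length_drop, List.length_map, PySem.List.length_pyRange_one, hfinlen, hlo2]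
    intro k hk1 hk2
    rw [List.length_drop, hfinlen] at hk1
    have hjm : (m - 8) + k < m := by omega
    rw [List.getElem_drop]
    rw [← List.getD_eq_getElem _ 0 (by rw [hfinlen]; exact hjm)]
    rw [phase_pow_getD _ m t1 _ hjm]
    rw [List.getElem_map, PySem.List.getElem_pyRange_one]
    have hlk : ((lo + (k : Int)).toNat) = (m - 8) + k := by omega
    rw [hlk]
    rw [PySem.List.slice_to _ (by omega : (0 : Int) ≤ lo + (k : Int) + 1)]
    have hbt : (lo + (k : Int) + 1).toNat = (m - 8) + k + 1 := by omega
    rw [hbt, ← List.map_take, List.take_range, min_eq_left (by omega : (m - 8) + k + 1 ≤ m)]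
    rw [foldl_dot0, PySem.Int.mod_eq_emod_of_pos (by norm_num)]
    simp only [List.length_map, List.length_range]
    rw [Finset.sum_int_mod]
    conv_rhs => rw [Finset.sum_int_mod]
    refine congrArg (fun z : Int => z % 10) (Finset.sum_congr rfl ?_)
    intro d hd
    have hdjn : d < (m - 8) + k + 1 := Finset.mem_range.mp hd
    rw [PySem.List.getD_map_range _ _ _ _ hdjn]
    rw [binomMod_spec 2 (by norm_num) d (t1 + d) 1 (by norm_num)]
    rw [binomMod_spec 5 (by norm_num) d (t1 + d) 1 (by norm_num)]
    rw [one_mul]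
    rw [PySem.Int.mod_eq_emod_of_pos (by norm_num)]
    exact (weight_term ((t1 + d).choose d) (rev.getD (((m - 8) + k - d) % n) 0)).symm
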